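-- pv_equiv track=rewrite | github.com/PhilippCode1/BitgetKiTrading | shared/python/src/shared_py/customer_lifecycle.py | allowed_lifecycle_targets
-- ===== SOURCE A (Python) =====
-- from enum import Enum
--
-- class LifecyclePhase(str, Enum):
--     """
--     Basis-Lebenszyklus eines Kundenkontos (ohne Pause/Sperre-Overlay).
--
--     PROSPECT = noch kein Konto; typischerweise kein DB-User.
--     """
--
--     PROSPECT = "prospect"
--     REGISTERED = "registered"
--     EMAIL_VERIFIED = "email_verified"
--     TRIAL_ACTIVE = "trial_active"
--     TRIAL_ENDED = "trial_ended"
--     CONTRACT_PENDING = "contract_pending"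
--     CONTRACT_ACTIVE = "contract_active"
--     PAYMENT_PENDING = "payment_pending"
--     PAYMENT_ACTIVE = "payment_active"
--     LIVE_PREPARED = "live_prepared"
--     LIVE_RELEASED = "live_released"
--
-- class TransitionActor(str, Enum):
--     """Wer den Statuswechsel ausloesen darf."""
--
--     SYSTEM = "system"
--     USER = "user"
--     ADMIN = "admin"
--
-- ALLOWED_LIFECYCLE_TRANSITIONS: tuple[tuple[LifecyclePhase, LifecyclePhase, frozenset[TransitionActor]], ...] = (
--     (LifecyclePhase.REGISTERED, LifecyclePhase.EMAIL_VERIFIED, frozenset({TransitionActor.SYSTEM})),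
--     (LifecyclePhase.EMAIL_VERIFIED, LifecyclePhase.TRIAL_ACTIVE, frozenset({TransitionActor.USER})),
--     (LifecyclePhase.TRIAL_ACTIVE, LifecyclePhase.TRIAL_ENDED, frozenset({TransitionActor.SYSTEM})),
--     (LifecyclePhase.TRIAL_ACTIVE, LifecyclePhase.CONTRACT_PENDING, frozenset({TransitionActor.USER})),
--     (LifecyclePhase.TRIAL_ENDED, LifecyclePhase.CONTRACT_PENDING, frozenset({TransitionActor.SYSTEM, TransitionActor.USER})),
--     (LifecyclePhase.CONTRACT_PENDING, LifecyclePhase.CONTRACT_ACTIVE, frozenset({TransitionActor.USER})),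
--     (LifecyclePhase.CONTRACT_ACTIVE, LifecyclePhase.PAYMENT_PENDING, frozenset({TransitionActor.SYSTEM})),
--     (LifecyclePhase.PAYMENT_PENDING, LifecyclePhase.PAYMENT_ACTIVE, frozenset({TransitionActor.SYSTEM})),
--     (LifecyclePhase.PAYMENT_ACTIVE, LifecyclePhase.LIVE_PREPARED, frozenset({TransitionActor.SYSTEM, TransitionActor.USER})),
--     (LifecyclePhase.LIVE_PREPARED, LifecyclePhase.LIVE_RELEASED, frozenset({TransitionActor.ADMIN})),
--     (LifecyclePhase.LIVE_RELEASED, LifecyclePhase.LIVE_PREPARED, frozenset({TransitionActor.ADMIN})),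
-- )
--
-- def allowed_lifecycle_targets(
--     from_phase: LifecyclePhase,
--     actor: TransitionActor,
-- ) -> frozenset[LifecyclePhase]:
--     """Alle Zielphasen, die von from_phase mit diesem Akteur erreichbar sind."""
--     out: set[LifecyclePhase] = {from_phase}
--     for f, t, actors in ALLOWED_LIFECYCLE_TRANSITIONS:
--         if f == from_phase and actor in actors:
--             out.add(t)
--     return frozenset(out)
-- ===== SOURCE B (Python) =====
-- from enum import Enum
--
-- class LifecyclePhase(str, Enum):
--     PROSPECT = "prospect"
--     REGISTERED = "registered"
--     EMAIL_VERIFIED = "email_verified"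
--     TRIAL_ACTIVE = "trial_active"
--     TRIAL_ENDED = "trial_ended"
--     CONTRACT_PENDING = "contract_pending"
--     CONTRACT_ACTIVE = "contract_active"
--     PAYMENT_PENDING = "payment_pending"
--     PAYMENT_ACTIVE = "payment_active"
--     LIVE_PREPARED = "live_prepared"
--     LIVE_RELEASED = "live_released"
--
-- class TransitionActor(str, Enum):
--     SYSTEM = "system"
--     USER = "user"
--     ADMIN = "admin"
--
-- P = LifecyclePhase
-- A = TransitionActor
--
-- # Precomputed lookup table: (from_phase, actor) -> reachable phases (source included).
-- # No per-call scan of a transition list; absent keys fall back to {from_phase}.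
-- TARGETS_BY_STATE = {
--     (P.REGISTERED, A.SYSTEM): frozenset({P.REGISTERED, P.EMAIL_VERIFIED}),
--     (P.EMAIL_VERIFIED, A.USER): frozenset({P.EMAIL_VERIFIED, P.TRIAL_ACTIVE}),
--     (P.TRIAL_ACTIVE, A.SYSTEM): frozenset({P.TRIAL_ACTIVE, P.TRIAL_ENDED}),
--     (P.TRIAL_ACTIVE, A.USER): frozenset({P.TRIAL_ACTIVE, P.CONTRACT_PENDING}),
--     (P.TRIAL_ENDED, A.SYSTEM): frozenset({P.TRIAL_ENDED, P.CONTRACT_PENDING}),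
--     (P.TRIAL_ENDED, A.USER): frozenset({P.TRIAL_ENDED, P.CONTRACT_PENDING}),
--     (P.CONTRACT_PENDING, A.USER): frozenset({P.CONTRACT_PENDING, P.CONTRACT_ACTIVE}),
--     (P.CONTRACT_ACTIVE, A.SYSTEM): frozenset({P.CONTRACT_ACTIVE, P.PAYMENT_PENDING}),
--     (P.PAYMENT_PENDING, A.SYSTEM): frozenset({P.PAYMENT_PENDING, P.PAYMENT_ACTIVE}),
--     (P.PAYMENT_ACTIVE, A.SYSTEM): frozenset({P.PAYMENT_ACTIVE, P.LIVE_PREPARED}),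
--     (P.PAYMENT_ACTIVE, A.USER): frozenset({P.PAYMENT_ACTIVE, P.LIVE_PREPARED}),
--     (P.LIVE_PREPARED, A.ADMIN): frozenset({P.LIVE_PREPARED, P.LIVE_RELEASED}),
--     (P.LIVE_RELEASED, A.ADMIN): frozenset({P.LIVE_RELEASED, P.LIVE_PREPARED}),
-- }
--
-- def allowed_lifecycle_targets(from_phase, actor):
--     """Alle Zielphasen, die von from_phase mit diesem Akteur erreichbar sind."""
--     return TARGETS_BY_STATE.get((from_phase, actor), frozenset({from_phase}))
-- ===== Notes on version B (the rewrite author's own statement) =====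
-- stated objective: alternative
-- what changed: Replaced the per-call scan over ALLOWED_LIFECYCLE_TRANSITIONS with a fully precomputed (from_phase, actor) -> targets lookup table, so the function body is a single dict lookup with frozenset({from_phase}) as the default; trades the derivation from the edge list for an O(1) lookup.
import Mathlib
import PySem

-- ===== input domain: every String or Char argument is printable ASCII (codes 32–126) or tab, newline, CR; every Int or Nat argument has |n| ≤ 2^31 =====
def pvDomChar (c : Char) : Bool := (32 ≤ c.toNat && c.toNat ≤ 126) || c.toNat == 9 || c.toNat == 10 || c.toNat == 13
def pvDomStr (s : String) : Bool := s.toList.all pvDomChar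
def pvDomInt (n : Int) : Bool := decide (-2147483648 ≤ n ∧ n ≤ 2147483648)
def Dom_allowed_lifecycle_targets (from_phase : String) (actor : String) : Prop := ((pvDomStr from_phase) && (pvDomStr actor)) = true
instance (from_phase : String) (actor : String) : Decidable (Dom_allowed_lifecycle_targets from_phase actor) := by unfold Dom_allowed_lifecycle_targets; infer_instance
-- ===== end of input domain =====

-- B replaces A's per-call scan of the transition edge list with a precomputed
-- (from_phase, actor) -> targets lookup table and a single dict lookup (objective: alternative).

-- ===== PORT A =====
-- A's module-level table: (from_phase, to_phase, allowed actors).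
def lcTable : List (String × String × List String) :=
  [("registered", "email_verified", ["system"]),
   ("email_verified", "trial_active", ["user"]),
   ("trial_active", "trial_ended", ["system"]),
   ("trial_active", "contract_pending", ["user"]),
   ("trial_ended", "contract_pending", ["system", "user"]),
   ("contract_pending", "contract_active", ["user"]),
   ("contract_active", "payment_pending", ["system"]),
   ("payment_pending", "payment_active", ["system"]),
   ("payment_active", "live_prepared", ["system", "user"]),
   ("live_prepared", "live_released", ["admin"]),
   ("live_released", "live_prepared", ["admin"])]

-- out = {from_phase}; for f, t, actors in table: if f == from_phase and actor in actors: out.add(t)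
def allowed_lifecycle_targets (from_phase : String) (actor : String) : List String :=
  lcTable.foldl (fun out ftt =>
    if ftt.1 == from_phase && PySem.Set.contains ftt.2.2 actor then
      PySem.Set.add out ftt.2.1
    else out) (PySem.Set.ofList [from_phase])

-- ===== PORT B =====
-- B's module-level precomputed lookup table TARGETS_BY_STATE (a dict literal).
def lcTargetsByState : PySem.Dict (String × String) (List String) := PySem.Dict.mk
  [(("registered", "system"), ["registered", "email_verified"]),
   (("email_verified", "user"), ["email_verified", "trial_active"]),
   (("trial_active", "system"), ["trial_active", "trial_ended"]),
   (("trial_active", "user"), ["trial_active", "contract_pending"]),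
   (("trial_ended", "system"), ["trial_ended", "contract_pending"]),
   (("trial_ended", "user"), ["trial_ended", "contract_pending"]),
   (("contract_pending", "user"), ["contract_pending", "contract_active"]),
   (("contract_active", "system"), ["contract_active", "payment_pending"]),
   (("payment_pending", "system"), ["payment_pending", "payment_active"]),
   (("payment_active", "system"), ["payment_active", "live_prepared"]),
   (("payment_active", "user"), ["payment_active", "live_prepared"]),
   (("live_prepared", "admin"), ["live_prepared", "live_released"]),
   (("live_released", "admin"), ["live_released", "live_prepared"])]

-- return TARGETS_BY_STATE.get((from_phase, actor), frozenset({from_phase}))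
def allowed_lifecycle_targets_alt (from_phase : String) (actor : String) : List String :=
  lcTargetsByState.getD (from_phase, actor) (PySem.Set.ofList [from_phase])

-- ===== PRECONDITION & SPEC =====
def Spec_allowed_lifecycle_targets (from_phase : String) (actor : String) (out : List String) : Prop := out = allowed_lifecycle_targets_alt from_phase actor
instance (from_phase : String) (actor : String) (out : List String) : Decidable (Spec_allowed_lifecycle_targets from_phase actor out) := by unfold Spec_allowed_lifecycle_targets; infer_instance

-- ===== CLAIM (what is proved, stated in full; the proofs are below) =====
def Claim_equal_allowed_lifecycle_targets : Prop := ∀ (from_phase : String) (actor : String), Dom_allowed_lifecycle_targets from_phase actor → Spec_allowed_lifecycle_targets from_phase actor (allowed_lifecycle_targets from_phase actor)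

-- ===== LEMMAS AND PROOFS =====
-- Case analysis over the finitely many source phases and actors occurring in the table.
theorem lc_agree : ∀ fp a : String,
    allowed_lifecycle_targets fp a = allowed_lifecycle_targets_alt fp a := by
  intro fp a
  unfold allowed_lifecycle_targets allowed_lifecycle_targets_alt
  by_cases h0 : fp = "registered"
  · subst h0
    by_cases g0 : a = "system"
    · subst g0; rfl
    · simp [lcTable, lcTargetsByState, List.foldl, PySem.Set.contains, PySem.Set.ofList, PySem.Set.add, PySem.Dict.getD, PySem.Dict.get?, g0, Ne.symm g0]
  ·
    by_cases h1 : fp = "email_verified"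
    · subst h1
      by_cases g0 : a = "user"
      · subst g0; rfl
      · simp [lcTable, lcTargetsByState, List.foldl, PySem.Set.contains, PySem.Set.ofList, PySem.Set.add, PySem.Dict.getD, PySem.Dict.get?, g0, Ne.symm g0]
    ·
      by_cases h2 : fp = "trial_active"
      · subst h2
        by_cases g0 : a = "system"
        · subst g0; rfl
        · by_cases g1 : a = "user"
          · subst g1; rfl
          · simp [lcTable, lcTargetsByState, List.foldl, PySem.Set.contains, PySem.Set.ofList, PySem.Set.add, PySem.Dict.getD, PySem.Dict.get?, g0, Ne.symm g0, g1, Ne.symm g1]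
      ·
        by_cases h3 : fp = "trial_ended"
        · subst h3
          by_cases g0 : a = "system"
          · subst g0; rfl
          · by_cases g1 : a = "user"
            · subst g1; rfl
            · simp [lcTable, lcTargetsByState, List.foldl, PySem.Set.contains, PySem.Set.ofList, PySem.Set.add, PySem.Dict.getD, PySem.Dict.get?, g0, Ne.symm g0, g1, Ne.symm g1]
        ·
          by_cases h4 : fp = "contract_pending"
          · subst h4
            by_cases g0 : a = "user"
            · subst g0; rfl
            · simp [lcTable, lcTargetsByState, List.foldl, PySem.Set.contains, PySem.Set.ofList, PySem.Set.add, PySem.Dict.getD, PySem.Dict.get?, g0, Ne.symm g0]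
          ·
            by_cases h5 : fp = "contract_active"
            · subst h5
              by_cases g0 : a = "system"
              · subst g0; rfl
              · simp [lcTable, lcTargetsByState, List.foldl, PySem.Set.contains, PySem.Set.ofList, PySem.Set.add, PySem.Dict.getD, PySem.Dict.get?, g0, Ne.symm g0]
            ·
              by_cases h6 : fp = "payment_pending"
              · subst h6
                by_cases g0 : a = "system"
                · subst g0; rfl
                · simp [lcTable, lcTargetsByState, List.foldl, PySem.Set.contains, PySem.Set.ofList, PySem.Set.add, PySem.Dict.getD, PySem.Dict.get?, g0, Ne.symm g0]
              ·
                by_cases h7 : fp = "payment_active"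
                · subst h7
                  by_cases g0 : a = "system"
                  · subst g0; rfl
                  · by_cases g1 : a = "user"
                    · subst g1; rfl
                    · simp [lcTable, lcTargetsByState, List.foldl, PySem.Set.contains, PySem.Set.ofList, PySem.Set.add, PySem.Dict.getD, PySem.Dict.get?, g0, Ne.symm g0, g1, Ne.symm g1]
                ·
                  by_cases h8 : fp = "live_prepared"
                  · subst h8
                    by_cases g0 : a = "admin"
                    · subst g0; rfl
                    · simp [lcTable, lcTargetsByState, List.foldl, PySem.Set.contains, PySem.Set.ofList, PySem.Set.add, PySem.Dict.getD, PySem.Dict.get?, g0, Ne.symm g0]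
                  ·
                    by_cases h9 : fp = "live_released"
                    · subst h9
                      by_cases g0 : a = "admin"
                      · subst g0; rfl
                      · simp [lcTable, lcTargetsByState, List.foldl, PySem.Set.contains, PySem.Set.ofList, PySem.Set.add, PySem.Dict.getD, PySem.Dict.get?, g0, Ne.symm g0]
                    ·
                      simp [lcTable, lcTargetsByState, List.foldl, PySem.Set.contains, PySem.Set.ofList, PySem.Set.add, PySem.Dict.getD, PySem.Dict.get?, Ne.symm h0, Ne.symm h1, Ne.symm h2, Ne.symm h3, Ne.symm h4, Ne.symm h5, Ne.symm h6, Ne.symm h7, Ne.symm h8, Ne.symm h9]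

-- ===== VERDICT (by name: the statement is the Claim_ definition above) =====
theorem allowed_lifecycle_targets_spec : Claim_equal_allowed_lifecycle_targets := by
  intro fp a _
  exact lc_agree fp a
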